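-- pv_equiv track=rewrite | github.com/fnever520/leetcode | moneylion.py | process_logs_1
-- ===== SOURCE A (Python) =====
-- def process_logs_1(logs):
--     # Create a dictionary to store the login counts for each user and date
--     login_counts = {}
--
--     # Loop through the logs and update the login counts dictionary
--     for log in logs:
--         # Check if the log has valid data
--         if len(log) != 3 or not log[0].startswith("user"):
--             continue
--
--         # Extract the user ID and login date from the log
--         user_id = log[0]
--         login_date = log[2]
--
--         # Update the login counts for the user and date
--         key = (user_id, login_date)
--         login_counts[key] = login_counts.get(key, 0) + 1
--         # login_counts[key] += 1
--     # Convert the login counts dictionary to a list of sorted strings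
--     result = []
--     for key, value in sorted(login_counts.items()):
--         user_id, login_date = key
--         result.append([user_id, login_date, str(value)])
--
--     return result
-- ===== SOURCE B (Python) =====
-- def process_logs_1(logs):
--     # Filter to valid (user_id, login_date) tuples, sort them, then one pass
--     # grouping consecutive equal tuples; no counts dictionary is maintained.
--     valid = sorted((log[0], log[2]) for log in logs
--                    if len(log) == 3 and log[0].startswith("user"))
--     result = []
--     n = len(valid)
--     i = 0
--     while i < n:
--         j = i
--         while j < n and valid[j] == valid[i]:
--             j += 1
--         user_id, login_date = valid[i]
--         result.append([user_id, login_date, str(j - i)])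
--         i = j
--     return result
-- ===== Notes on version B (the rewrite author's own statement) =====
-- stated objective: alternative
-- what changed: Replaces A's hash-map counting followed by sorting the dict items with a sort-then-scan: flatten logs to valid (user,date) tuples, sort them, and emit counts by grouping consecutive equal tuples in one pass, with no counts dictionary.
import Mathlib
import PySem

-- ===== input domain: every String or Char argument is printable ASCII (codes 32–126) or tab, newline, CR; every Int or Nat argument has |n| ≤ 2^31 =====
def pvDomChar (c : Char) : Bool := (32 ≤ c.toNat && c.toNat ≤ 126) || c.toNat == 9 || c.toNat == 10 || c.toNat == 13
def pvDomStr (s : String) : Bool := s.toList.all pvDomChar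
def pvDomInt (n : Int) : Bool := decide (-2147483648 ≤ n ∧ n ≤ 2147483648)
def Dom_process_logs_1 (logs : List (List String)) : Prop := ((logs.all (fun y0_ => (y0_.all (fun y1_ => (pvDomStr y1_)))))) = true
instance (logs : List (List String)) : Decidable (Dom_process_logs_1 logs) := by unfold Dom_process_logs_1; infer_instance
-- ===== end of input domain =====

-- B replaces A's dict-count-then-sort with flatten-to-valid-tuples, sort, and one grouping
-- pass over consecutive equal tuples (alternative decomposition; no counts dictionary).
-- Python's tuple '<' on (str, str) is the lexicographic order, modelled by 'Lex (String × String)'.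

-- ===== PORT A =====
-- A's dict keys are the Python tuples (user_id, login_date). sorted(login_counts.items())
-- compares the pairs (key, value) by Python tuple '<', i.e. lexicographically: 'toLex' — exact.
def process_logs_1 (logs : List (List String)) : List (List String) :=
  let login_counts : PySem.Dict (Lex (String × String)) Int :=
    logs.foldl (fun d log =>
      -- 'len(log) != 3 or not log[0].startswith("user")': log[0] is only reached when
      -- len(log) == 3, so the default-read pyGetD log 0 "" is exact here.
      if (log.length != 3) || !(PySem.Str.startswith (PySem.List.pyGetD log 0 "") "user") then d
      else
        let user_id := PySem.List.pyGetD log 0 ""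
        let login_date := PySem.List.pyGetD log 2 ""
        let key : Lex (String × String) := toLex (user_id, login_date)
        d.insert key (d.getD key 0 + 1)) PySem.Dict.empty
  (PySem.List.sorted login_counts.items (fun it => toLex it) false).foldl
    (fun result kv => result ++ [[(ofLex kv.1).1, (ofLex kv.1).2, PySem.Int.toStr kv.2]]) []

-- ===== PORT B =====
-- B's validity filter ('len(log) == 3 and log[0].startswith("user")') and key extraction.
def pvPb (log : List String) : Bool :=
  (log.length == 3) && PySem.Str.startswith (PySem.List.pyGetD log 0 "") "user"

def pvKey (log : List String) : Lex (String × String) :=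
  toLex (PySem.List.pyGetD log 0 "", PySem.List.pyGetD log 2 "")

-- B's grouping scan: the outer while advances run by run; the inner while that moves j past
-- the elements equal to valid[i] is the takeWhile/dropWhile split of the remaining list.
def pvGroup (vs : List (Lex (String × String))) : List (List String) :=
  match vs with
  | [] => []
  | x :: rest =>
    let run := rest.takeWhile (fun y => y == x)
    [(ofLex x).1, (ofLex x).2, PySem.Int.toStr (1 + (run.length : Int))]
      :: pvGroup (rest.dropWhile (fun y => y == x))
termination_by vs.length
decreasing_by
  simpa using Nat.lt_succ_of_le (List.length_dropWhile_le _ _)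

def process_logs_1_alt (logs : List (List String)) : List (List String) :=
  let valid := PySem.List.sorted ((logs.filter pvPb).map pvKey) (fun x => x) false
  pvGroup valid

-- ===== PRECONDITION & SPEC =====
def Spec_process_logs_1 (logs : List (List String)) (out : List (List String)) : Prop := out = process_logs_1_alt logs
instance (logs : List (List String)) (out : List (List String)) : Decidable (Spec_process_logs_1 logs out) := by unfold Spec_process_logs_1; infer_instance

-- ===== CLAIM (what is proved, stated in full; the proofs are below) =====
def Claim_equal_process_logs_1 : Prop := ∀ (logs : List (List String)), Dom_process_logs_1 logs → Spec_process_logs_1 logs (process_logs_1 logs)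

-- ===== LEMMAS AND PROOFS =====

-- The valid keys of the input, in input order (shared vocabulary of the proofs).
def pvKs (logs : List (List String)) : List (Lex (String × String)) :=
  (logs.filter pvPb).map pvKey

def pvRow (k : Lex (String × String)) (c : Int) : List String :=
  [(ofLex k).1, (ofLex k).2, PySem.Int.toStr c]

-- Structural characterisation of first-occurrence dedup (= PySem.Set.ofList).
def pvDedup {α : Type} [BEq α] : List α → List α
  | [] => []
  | x :: xs => x :: (pvDedup xs).filter (fun y => !(y == x))

lemma pvOfList_go {α : Type} [BEq α] [LawfulBEq α] (xs : List α) (acc : List α) :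
    xs.foldl PySem.Set.add acc = acc ++ (pvDedup xs).filter (fun y => !(acc.contains y)) := by
  induction xs generalizing acc with
  | nil => simp [pvDedup]
  | cons x xs ih =>
    simp only [List.foldl_cons, pvDedup, PySem.Set.add, PySem.Set.contains]
    by_cases hx : acc.contains x = true
    · rw [if_pos hx, ih]
      congr 1
      rw [List.filter_cons]
      have hmem : x ∈ acc := by simpa using hx
      have hxx : (!acc.contains x) = false := by simp [hmem]
      simp only [hxx]
      simp only [List.filter_filter]
      apply List.filter_congr
      intro y _
      by_cases hy : y = x
      · subst hy; simp [hmem]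
      · simp [hy]
    · rw [if_neg hx, ih]
      rw [List.filter_cons]
      have hxx : (!acc.contains x) = true := by simp_all
      simp only [hxx, if_pos]
      rw [List.append_assoc, List.singleton_append]
      congr 2
      simp only [List.filter_filter]
      apply List.filter_congr
      intro y _
      by_cases hy : y = x
      · subst hy
        have : y ∉ acc := by simpa using hx
        simp [this]
      · simp [hy, List.contains_append]

lemma pvOfList_eq {α : Type} [BEq α] [LawfulBEq α] (xs : List α) :
    PySem.Set.ofList xs = pvDedup xs := by
  have h := pvOfList_go xs []
  rw [PySem.Set.ofList_eq_foldl, h]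
  simp

lemma pvDedup_sublist {α : Type} [BEq α] (xs : List α) : (pvDedup xs).Sublist xs := by
  induction xs with
  | nil => simp [pvDedup]
  | cons x xs ih =>
    exact (List.Sublist.cons₂ x ((List.filter_sublist).trans ih))

lemma pvDedup_mem {α : Type} [BEq α] [LawfulBEq α] (xs : List α) (y : α) :
    y ∈ pvDedup xs ↔ y ∈ xs := by
  rw [← pvOfList_eq]; exact PySem.Set.mem_ofList xs y

lemma pvDedup_cons_of {α : Type} [BEq α] [LawfulBEq α] (x : α) (t d : List α)
    (ht : ∀ y ∈ t, y = x) (hd : x ∉ d) :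
    pvDedup (x :: (t ++ d)) = x :: pvDedup d := by
  induction t with
  | nil =>
    simp only [List.nil_append, pvDedup]
    congr 1
    apply List.filter_eq_self.2
    intro y hy
    have : y ∈ d := (pvDedup_mem d y).1 hy
    have : y ≠ x := fun h => hd (h ▸ this)
    simp [this]
  | cons z t iht =>
    have hz : z = x := ht z (by simp)
    subst hz
    have h1 : pvDedup (z :: (t ++ d)) = z :: pvDedup d :=
      iht (fun y hy => ht y (by simp [hy]))
    show pvDedup (z :: (z :: (t ++ d))) = z :: pvDedup d
    simp only [pvDedup] at h1 ⊢
    have h3 : List.filter (fun y => !(y == z)) (pvDedup (t ++ d)) = pvDedup d := by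
      exact List.cons_injective.eq_iff.mp h1
    rw [List.filter_cons]
    simp only [beq_self_eq_true, Bool.not_true, List.filter_filter, Bool.and_self]
    exact congrArg (z :: ·) h3

lemma pvHead_dropWhile {α : Type} (p : α → Bool) (l : List α) (a : α) (t : List α)
    (h : l.dropWhile p = a :: t) : p a = false := by
  induction l with
  | nil => simp at h
  | cons z l ih =>
    rw [List.dropWhile_cons] at h
    by_cases hz : p z = true
    · rw [if_pos hz] at h; exact ih h
    · rw [if_neg hz] at h
      cases h; simpa using hz

lemma pvGroup_eq (l : List (Lex (String × String))) (h : l.Pairwise (· ≤ ·)) :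
    pvGroup l = (pvDedup l).map (fun k => pvRow k (l.count k)) := by
  induction l using pvGroup.induct with
  | case1 => simp [pvGroup, pvDedup]
  | case2 x rest ih =>
    rcases h with _ | ⟨hx, hrest⟩
    set t := rest.takeWhile (fun y => y == x) with hteq
    set d := rest.dropWhile (fun y => y == x) with hdeq
    have hrd : t ++ d = rest := List.takeWhile_append_dropWhile
    have ht : ∀ y ∈ t, y = x := fun y hy => by
      simpa using List.mem_takeWhile_imp hy
    have hdsub : d.Sublist rest := List.dropWhile_sublist _
    have hdpair : d.Pairwise (· ≤ ·) := hrest.sublist hdsub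
    have hxd : x ∉ d := by
      intro hxin
      cases hde : d with
      | nil => rw [hde] at hxin; simp at hxin
      | cons z dt =>
        have hdw : rest.dropWhile (fun y => y == x) = z :: dt := by rw [← hdeq, hde]
        have hz : (z == x) = false := pvHead_dropWhile (fun y => y == x) rest z dt hdw
        have hzx : z ≠ x := by simpa using hz
        -- x ∈ z :: dt; x ≤ everything in rest ⊇ d, and z ≤ everything in dt
        rw [hde] at hxin
        rcases List.mem_cons.mp hxin with h1 | h1
        · exact hzx h1.symm
        · have hzd : z ∈ rest := hdsub.mem (hde ▸ List.mem_cons_self)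
          have hxz : x ≤ z := hx z hzd
          have hpair : (z :: dt).Pairwise (· ≤ ·) := hde ▸ hdpair
          have hzx' : z ≤ x := (List.pairwise_cons.mp hpair).1 x h1
          exact hzx (le_antisymm hzx' hxz)
    -- rows
    have hcount_x : (x :: rest).count x = 1 + t.length := by
      rw [← hrd, List.count_cons_self, List.count_append]
      have h1 : t.count x = t.length := List.count_eq_length.mpr (fun b hb => (ht b hb).symm)
      have h2 : d.count x = 0 := List.count_eq_zero.mpr hxd
      omega
    have hded : pvDedup (x :: rest) = x :: pvDedup d := by
      rw [← hrd]; exact pvDedup_cons_of x t d ht hxd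
    rw [pvGroup, hded]
    simp only [List.map_cons]
    congr 1
    · simp only [pvRow, hcount_x, ← hteq]
      norm_num
    · rw [ih hdpair]
      apply List.map_congr_left
      intro k hk
      have hkd : k ∈ d := (pvDedup_mem d k).1 hk
      have hkx : k ≠ x := fun he => hxd (he ▸ hkd)
      have hcz : (x :: rest).count k = d.count k := by
        rw [← hrd, List.count_cons_of_ne hkx.symm, List.count_append]
        have : t.count k = 0 := List.count_eq_zero.mpr (fun hkt => hkx (ht k hkt))
        omega
      rw [hcz]

lemma pvSorted_dedup (ks : List (Lex (String × String))) :
    pvDedup (PySem.List.sorted ks (fun x => x) false) =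
      PySem.List.sorted (PySem.Set.ofList ks) (fun x => x) false := by
  set dk := PySem.List.sorted ks (fun x => x) false with hdk
  set S := PySem.List.sorted (PySem.Set.ofList ks) (fun x => x) false with hS
  have hLnd : (pvDedup dk).Nodup := by
    rw [← pvOfList_eq]; exact PySem.Set.nodup_ofList dk
  have hRnd : S.Nodup :=
    ((PySem.List.sorted_perm (PySem.Set.ofList ks) (fun x => x) false).nodup_iff).mpr
      (PySem.Set.nodup_ofList ks)
  have hperm : (pvDedup dk).Perm S := by
    rw [List.perm_ext_iff_of_nodup hLnd hRnd]
    intro a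
    rw [pvDedup_mem, PySem.List.mem_sorted, PySem.List.mem_sorted, PySem.Set.mem_ofList]
  have hdkp : dk.Pairwise (· ≤ ·) := PySem.List.sorted_pairwise ks (fun x => x)
  have hLp : (pvDedup dk).Pairwise (· ≤ ·) := hdkp.sublist (pvDedup_sublist dk)
  have hLlt : (pvDedup dk).Pairwise (· < ·) := by
    have := hLp.and hLnd
    exact this.imp (fun h => lt_of_le_of_ne h.1 h.2)
  have hRlt : S.Pairwise (· < ·) := PySem.List.sorted_ofList_pairwise_lt ks
  exact List.eq_of_perm_of_sorted (fun a b _ _ h1 h2 => ((lt_asymm h1) h2).elim) hLlt hRlt hperm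

lemma pvB_eq (logs : List (List String)) :
    process_logs_1_alt logs =
      (PySem.List.sorted (PySem.Set.ofList (pvKs logs)) (fun x => x) false).map
        (fun k => pvRow k ((pvKs logs).count k)) := by
  show pvGroup (PySem.List.sorted (pvKs logs) (fun x => x) false) = _
  rw [pvGroup_eq _ (PySem.List.sorted_pairwise (pvKs logs) (fun x => x)), pvSorted_dedup]
  apply List.map_congr_left
  intro k _
  rw [(PySem.List.sorted_perm (pvKs logs) (fun x => x) false).count_eq]

lemma pvA_loop (logs : List (List String)) :
    logs.foldl (fun (d : PySem.Dict (Lex (String × String)) Int) log =>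
      if (log.length != 3) || !(PySem.Str.startswith (PySem.List.pyGetD log 0 "") "user") then d
      else
        let user_id := PySem.List.pyGetD log 0 ""
        let login_date := PySem.List.pyGetD log 2 ""
        let key : Lex (String × String) := toLex (user_id, login_date)
        d.insert key (d.getD key 0 + 1)) PySem.Dict.empty
      = PySem.Dict.counter (pvKs logs) := by
  have h1 : logs.foldl (fun (d : PySem.Dict (Lex (String × String)) Int) log =>
      if (log.length != 3) || !(PySem.Str.startswith (PySem.List.pyGetD log 0 "") "user") then d
      else
        let user_id := PySem.List.pyGetD log 0 ""
        let login_date := PySem.List.pyGetD log 2 ""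
        let key : Lex (String × String) := toLex (user_id, login_date)
        d.insert key (d.getD key 0 + 1)) PySem.Dict.empty
      = logs.foldl (fun (d : PySem.Dict (Lex (String × String)) Int) log =>
          if pvPb log then d.insert (pvKey log) (d.getD (pvKey log) 0 + 1) else d)
        PySem.Dict.empty := by
    apply PySem.List.foldl_congr_mem
    intro acc log _
    cases hp : pvPb log with
    | true =>
      have hp2 := hp
      simp only [pvPb, Bool.and_eq_true, beq_iff_eq] at hp2
      have hcond : ((log.length != 3) || !(PySem.Str.startswith (PySem.List.pyGetD log 0 "") "user")) = false := by
        rw [Bool.or_eq_false_iff]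
        exact ⟨by simp [hp2.1], by rw [hp2.2]; rfl⟩
      rw [hcond]
      rfl
    | false =>
      have hp2 := hp
      simp only [pvPb, Bool.and_eq_false_iff] at hp2
      have hcond : ((log.length != 3) || !(PySem.Str.startswith (PySem.List.pyGetD log 0 "") "user")) = true := by
        rw [Bool.or_eq_true_iff]
        rcases hp2 with h | h
        · exact Or.inl (by simp only [bne_iff_ne, ne_eq, decide_eq_true_eq]; simpa using h)
        · exact Or.inr (by rw [h]; rfl)
      rw [hcond]
      rfl
  rw [h1, PySem.List.foldl_if_eq_foldl_filter pvPb
        (fun (d : PySem.Dict (Lex (String × String)) Int) log => d.insert (pvKey log) (d.getD (pvKey log) 0 + 1)) logs PySem.Dict.empty]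
  rw [show (fun (d : PySem.Dict (Lex (String × String)) Int) log =>
        d.insert (pvKey log) (d.getD (pvKey log) 0 + 1))
      = (fun (d : PySem.Dict (Lex (String × String)) Int) log => (fun (d : PySem.Dict (Lex (String × String)) Int) k => PySem.Dict.insert d k (d.getD k 0 + 1)) d (pvKey log)) from rfl]
  rw [← List.foldl_map (f := pvKey)
        (g := fun (d : PySem.Dict (Lex (String × String)) Int) k => PySem.Dict.insert d k (d.getD k 0 + 1))]
  exact PySem.Dict.foldl_insert_getD_add_one_eq_counter ((logs.filter pvPb).map pvKey)

lemma pvA_eq (logs : List (List String)) :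
    process_logs_1 logs =
      (PySem.List.sorted (PySem.Set.ofList (pvKs logs)) (fun x => x) false).map
        (fun k => pvRow k ((pvKs logs).count k)) := by
  show (PySem.List.sorted _ (fun it : Lex (String × String) × Int => toLex it) false).foldl
      (fun result (kv : Lex (String × String) × Int) => result ++ [[(ofLex kv.1).1, (ofLex kv.1).2, PySem.Int.toStr kv.2]]) [] = _
  rw [pvA_loop, PySem.List.foldl_append_singleton_eq_map
    (fun kv : Lex (String × String) × Int => [(ofLex kv.1).1, (ofLex kv.1).2, PySem.Int.toStr kv.2])]
  rw [PySem.Dict.items_counter]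
  have hsorted : PySem.List.sorted
      ((PySem.Set.ofList (pvKs logs)).map (fun k => (k, ((pvKs logs).count k : Int))))
      (fun it => toLex it) false
      = (PySem.List.sorted (PySem.Set.ofList (pvKs logs)) (fun x => x) false).map
          (fun k => (k, ((pvKs logs).count k : Int))) := by
    apply PySem.List.sorted_eq_of_perm_of_pairwise_lt
    · exact (PySem.List.sorted_perm (PySem.Set.ofList (pvKs logs)) (fun x => x) false).map
        (fun k => (k, ((pvKs logs).count k : Int)))
    · rw [List.pairwise_map]
      apply (PySem.List.sorted_ofList_pairwise_lt (pvKs logs)).imp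
      intro a b hab
      rw [Prod.Lex.lt_iff]
      exact Or.inl hab
  rw [hsorted, List.map_map]
  rfl

-- ===== VERDICT (by name: the statement is the Claim_ definition above) =====
theorem process_logs_1_spec : Claim_equal_process_logs_1 := by
  intro logs _
  show process_logs_1 logs = process_logs_1_alt logs
  rw [pvA_eq, pvB_eq]
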